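-- pv_equiv track=rewrite | github.com/dllzg2012/Co-Senti-BERTCNN | data/co_adr_drug_dataprocess.py | merge_drug_adr_dict
-- ===== SOURCE A (Python) =====
-- def merge_drug_adr_dict(dict,add_dict):
--     drug_adr_dict={}
--     drug_list=dict.keys()
--     add_drug_list=add_dict.keys()
--     inter_list=list(set(drug_list).intersection(set(add_drug_list)))
--     add_list=add_drug_list-inter_list
--     for drug in drug_list:
--         drug_adr_dict[drug]=dict[drug]
--     for add_drug in add_list:
--         drug_adr_dict[add_drug] = add_dict[add_drug]
--     return drug_adr_dict
-- ===== SOURCE B (Python) =====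
-- def merge_drug_adr_dict(dict, add_dict):
--     merged = {}
--     for drug, adrs in [*dict.items(), *add_dict.items()]:
--         if drug not in merged:
--             merged[drug] = adrs
--     return merged
-- ===== Notes on version B (the rewrite author's own statement) =====
-- stated objective: simpler
-- what changed: A builds set(keys) intersection/difference indexes and runs two differently shaped copy loops over the two dicts; B concatenates both item streams and makes one uniform first-occurrence-wins pass over the combined stream, so the first dict's value wins on shared keys with no set machinery and no per-dict loops.
import Mathlib
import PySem

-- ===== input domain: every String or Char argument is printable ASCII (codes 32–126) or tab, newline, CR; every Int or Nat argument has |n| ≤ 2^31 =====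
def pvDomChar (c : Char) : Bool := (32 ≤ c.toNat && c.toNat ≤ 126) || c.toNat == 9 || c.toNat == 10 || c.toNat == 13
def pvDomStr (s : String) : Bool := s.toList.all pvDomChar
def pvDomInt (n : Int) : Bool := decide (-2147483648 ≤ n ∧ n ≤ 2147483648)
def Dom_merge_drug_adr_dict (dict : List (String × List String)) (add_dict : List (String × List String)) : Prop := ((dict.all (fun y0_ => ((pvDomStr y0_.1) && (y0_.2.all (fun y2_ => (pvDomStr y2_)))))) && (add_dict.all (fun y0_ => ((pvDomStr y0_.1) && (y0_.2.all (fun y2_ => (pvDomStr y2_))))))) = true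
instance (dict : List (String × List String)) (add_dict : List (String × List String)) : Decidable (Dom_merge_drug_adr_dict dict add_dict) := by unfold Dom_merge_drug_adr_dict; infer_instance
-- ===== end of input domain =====

-- B replaces A's set-intersection/difference indexes and two shaped copy loops by one uniform
-- first-occurrence-wins pass over the concatenated item streams; objective: simpler (no speed claim).


-- ===== PORT A =====
-- literal port of A; dict[drug] is ported as getD with default [] — exact here because every
-- looked-up key comes from the corresponding dict's keys, so the Python lookup never raises
def merge_drug_adr_dict (dict : List (String × List String)) (add_dict : List (String × List String)) : List (String × List String) :=
  let d := PySem.Dict.ofList dict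
  let ad := PySem.Dict.ofList add_dict
  let drug_list := d.keys
  let add_drug_list := ad.keys
  let inter_list := PySem.Set.inter (PySem.Set.ofList drug_list) (PySem.Set.ofList add_drug_list)
  let add_list := PySem.Set.diff (PySem.Set.ofList add_drug_list) inter_list
  let out1 := drug_list.foldl (fun acc drug => acc.insert drug (d.getD drug [])) PySem.Dict.empty
  let out2 := add_list.foldl (fun acc add_drug => acc.insert add_drug (ad.getD add_drug [])) out1
  out2.items

-- ===== PORT B =====
-- B: one first-occurrence-wins pass over the concatenated item streams of both dicts
def merge_drug_adr_dict_alt (dict : List (String × List String)) (add_dict : List (String × List String)) : List (String × List String) :=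
  let stream := (PySem.Dict.ofList dict).items ++ (PySem.Dict.ofList add_dict).items
  (stream.foldl (fun merged p => if merged.contains p.1 then merged else merged.insert p.1 p.2)
    PySem.Dict.empty).items

-- ===== PRECONDITION & SPEC =====
def Spec_merge_drug_adr_dict (dict : List (String × List String)) (add_dict : List (String × List String)) (out : List (String × List String)) : Prop := out = merge_drug_adr_dict_alt dict add_dict
instance (dict : List (String × List String)) (add_dict : List (String × List String)) (out : List (String × List String)) : Decidable (Spec_merge_drug_adr_dict dict add_dict out) := by unfold Spec_merge_drug_adr_dict; infer_instance

-- ===== CLAIM (what is proved, stated in full; the proofs are below) =====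
def Claim_equal_merge_drug_adr_dict : Prop := ∀ (dict : List (String × List String)) (add_dict : List (String × List String)), Dom_merge_drug_adr_dict dict add_dict → Spec_merge_drug_adr_dict dict add_dict (merge_drug_adr_dict dict add_dict)

-- ===== LEMMAS AND PROOFS =====

-- a dict with Nodup keys is re-created by copying its keys' values
theorem map_keys_getD_eq_items {κ ν : Type} [BEq κ] [LawfulBEq κ] (d : PySem.Dict κ ν) (dflt : ν)
    (h : d.keys.Nodup) : d.keys.map (fun k => (k, d.getD k dflt)) = d.items := by
  unfold PySem.Dict.keys
  rw [List.map_map]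
  conv_rhs => rw [← List.map_id d.items]
  apply List.map_congr_left
  intro p hp
  simp only [Function.comp, id]
  rw [PySem.Dict.getD_of_mem_items (k := p.1) (v := p.2) d (by simpa using hp) h]

-- B's loop shape: a first-wins fold over pairs with distinct keys appends the fresh ones
theorem foldl_firstwins_items {κ ν : Type} [BEq κ] [LawfulBEq κ]
    (l : List (κ × ν)) (m : PySem.Dict κ ν) (h : (l.map Prod.fst).Nodup) :
    (l.foldl (fun m p => if m.contains p.1 then m else m.insert p.1 p.2) m).items
      = m.items ++ l.filter (fun p => !m.contains p.1) := by
  induction l generalizing m with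
  | nil => simp
  | cons p l ih =>
    simp only [List.map_cons, List.nodup_cons, List.mem_map] at h
    obtain ⟨hfresh, hnd⟩ := h
    by_cases hc : m.contains p.1 = true
    · simp only [List.foldl_cons, List.filter_cons, hc]
      simpa using ih m hnd
    · replace hc : m.contains p.1 = false := by simpa using hc
      simp only [List.foldl_cons, hc, Bool.false_eq_true, if_false]
      rw [ih _ hnd, PySem.Dict.items_insert_of_not_contains _ _ hc,
        List.filter_cons_of_pos (by simp [hc]), List.append_assoc]
      simp only [List.cons_append, List.nil_append]
      congr 2
      apply List.filter_congr
      intro q hq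
      have hne : q.1 ≠ p.1 := fun he => hfresh ⟨q, hq, he⟩
      rw [PySem.Dict.contains_insert]
      simp [hne]

theorem merge_eq (dict add_dict : List (String × List String)) :
    merge_drug_adr_dict dict add_dict = merge_drug_adr_dict_alt dict add_dict := by
  simp only [merge_drug_adr_dict, merge_drug_adr_dict_alt]
  set d := PySem.Dict.ofList dict with hd
  set ad := PySem.Dict.ofList add_dict with had
  have hdn : d.keys.Nodup := PySem.Dict.nodup_keys_ofList dict
  have han : ad.keys.Nodup := PySem.Dict.nodup_keys_ofList add_dict
  -- A's first loop recreates d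
  have h1 : d.keys.foldl (fun acc drug => acc.insert drug (d.getD drug [])) PySem.Dict.empty = d := by
    apply PySem.Dict.ext
    rw [PySem.Dict.items_foldl_insert_fresh (k := fun x => x) (v := fun k => d.getD k [])
        _ _ (by intro a _; simp [PySem.Dict.contains_empty]) (by simpa using hdn)]
    simpa [PySem.Dict.empty] using map_keys_getD_eq_items d [] hdn
  rw [h1]
  -- A's add_list is ad.keys filtered to the keys absent from d
  have h2 : PySem.Set.diff (PySem.Set.ofList ad.keys)
      (PySem.Set.inter (PySem.Set.ofList d.keys) (PySem.Set.ofList ad.keys))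
      = ad.keys.filter (fun k => !d.contains k) := by
    rw [PySem.Set.ofList_eq_self_of_nodup _ han]
    unfold PySem.Set.diff
    apply List.filter_congr
    intro k hk
    congr 1
    simp only [PySem.Set.inter, PySem.Set.contains, PySem.Dict.contains_eq_decide_mem_keys]
    by_cases hmem : k ∈ d.keys
    · simp [List.mem_filter, PySem.Set.mem_ofList, hmem, hk]
    · simp [List.mem_filter, PySem.Set.mem_ofList, hmem]
  rw [h2]
  -- A's second loop appends exactly the fresh items of ad
  have hfiltnd : (ad.keys.filter (fun k => !d.contains k)).Nodup := han.filter _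
  rw [PySem.Dict.items_foldl_insert_fresh (k := fun x => x) (v := fun k => ad.getD k []) _ _
      (by intro a ha
          have := (List.mem_filter.mp ha).2
          simpa using this)
      (by simpa using hfiltnd)]
  -- B's single pass: split the stream; the first segment rebuilds d, the second appends the fresh items
  rw [List.foldl_append]
  have hb1 : (d.items.foldl (fun m p => if m.contains p.1 then m else m.insert p.1 p.2)
      PySem.Dict.empty) = d := by
    apply PySem.Dict.ext
    rw [foldl_firstwins_items _ _ (by simpa [PySem.Dict.keys] using hdn),
      List.filter_eq_self.mpr (fun p _ => by simp [PySem.Dict.contains_empty])]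
    simp [PySem.Dict.empty]
  rw [hb1, foldl_firstwins_items _ _ (by simpa [PySem.Dict.keys] using han)]
  congr 1
  -- the two appended tails coincide
  have hkeys : ad.keys.filter (fun k => !d.contains k)
      = (ad.items.filter (fun p => !d.contains p.1)).map Prod.fst := by
    unfold PySem.Dict.keys
    rw [List.filter_map]
    rfl
  rw [hkeys, List.map_map]
  conv_rhs => rw [← List.map_id (ad.items.filter (fun p => !d.contains p.1))]
  apply List.map_congr_left
  intro p hp
  have hpmem : p ∈ ad.items := (List.mem_filter.mp hp).1
  simp only [Function.comp, id]
  rw [PySem.Dict.getD_of_mem_items (k := p.1) (v := p.2) ad (by simpa using hpmem) han]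

-- ===== VERDICT (by name: the statement is the Claim_ definition above) =====
theorem merge_drug_adr_dict_spec : Claim_equal_merge_drug_adr_dict := by
  intro dict add_dict _
  unfold Spec_merge_drug_adr_dict
  exact merge_eq dict add_dict
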